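-- pv_equiv track=rewrite | github.com/goodminjeong/programmers | Day2/04_sort_string.py | solution
-- ===== SOURCE A (Python) =====
-- def solution(my_string):
--     answer = []
--     for i in my_string:
--         if i.isdigit():
--             answer.append(int(i))
--         else:
--             pass
--     sorted_answer = sorted(answer)
--     return sorted_answer
-- ===== SOURCE B (Python) =====
-- def solution(my_string):
--     # counting sort over the 10 digit buckets instead of collecting + comparison sort
--     counts = {}
--     for ch in my_string:
--         if ch.isdigit():
--             d = int(ch)
--             counts[d] = counts.get(d, 0) + 1
--     answer = []
--     for v in range(10):
--         answer += [v] * counts.get(v, 0)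
--     return answer
-- ===== Notes on version B (the rewrite author's own statement) =====
-- stated objective: alternative
-- what changed: Replaces collect-then-comparison-sort with a one-pass counting sort: a dict of digit counts built in one pass, then the answer emitted bucket by bucket for v = 0..9.
import Mathlib
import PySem

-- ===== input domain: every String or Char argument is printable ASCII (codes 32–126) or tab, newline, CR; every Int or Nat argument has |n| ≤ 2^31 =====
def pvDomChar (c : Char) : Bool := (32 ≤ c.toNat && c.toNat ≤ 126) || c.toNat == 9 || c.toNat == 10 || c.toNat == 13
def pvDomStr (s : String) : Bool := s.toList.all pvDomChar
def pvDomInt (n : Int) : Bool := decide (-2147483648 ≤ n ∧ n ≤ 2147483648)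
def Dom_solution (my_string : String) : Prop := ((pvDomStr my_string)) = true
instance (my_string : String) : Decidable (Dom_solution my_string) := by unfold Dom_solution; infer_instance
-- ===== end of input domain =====

-- B replaces A's collect-then-comparison-sort by a counting sort over the 10 digit buckets (alternative algorithm, same return value).

-- int(i) for a single character i (both Pythons call it only under an isdigit guard, so the
-- Option is always some; the .getD 0 default is unreachable there)
def digVal (c : Char) : Int := (PySem.Int.ofChars? [c]).getD 0

-- ===== PORT A =====
def solution (my_string : String) : List Int :=
  let answer := my_string.toList.foldl
    (fun acc i => if PySem.Chars.isdigit i then acc ++ [digVal i] else acc) []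
  PySem.List.sorted answer (fun x => x)

-- ===== PORT B =====
def solution_alt (my_string : String) : List Int :=
  let counts : PySem.Dict Int Int := my_string.toList.foldl
    (fun d ch => if PySem.Chars.isdigit ch then d.modify (digVal ch) 0 (· + 1) else d)
    PySem.Dict.empty
  (PySem.List.pyRange 0 10 1).foldl
    (fun answer v => answer ++ PySem.List.pyRepeat [v] (counts.getD v 0)) []

-- ===== PRECONDITION & SPEC =====
def Spec_solution (my_string : String) (out : List Int) : Prop := out = solution_alt my_string
instance (my_string : String) (out : List Int) : Decidable (Spec_solution my_string out) := by unfold Spec_solution; infer_instance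

-- ===== CLAIM (what is proved, stated in full; the proofs are below) =====
def Claim_equal_solution : Prop := ∀ (my_string : String), Dom_solution my_string → Spec_solution my_string (solution my_string)

-- ===== LEMMAS AND PROOFS =====

-- the digit characters of the string, as ints: what A's first loop collects
def pvDigits (s : String) : List Int :=
  (s.toList.filter PySem.Chars.isdigit).map digVal

lemma digVal_mem_range (c : Char) (h : PySem.Chars.isdigit c = true) :
    digVal c ∈ ([0,1,2,3,4,5,6,7,8,9] : List Int) := by
  simp only [PySem.Chars.isdigit, Bool.and_eq_true, decide_eq_true_eq] at h
  obtain ⟨h1, h2⟩ := h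
  have hlo : 48 ≤ c.toNat := UInt32.le_iff_toNat_le.mp (Char.le_def.mp h1)
  have hhi : c.toNat ≤ 57 := UInt32.le_iff_toNat_le.mp (Char.le_def.mp h2)
  have hc : Char.ofNat c.toNat = c := Char.ofNat_toNat c
  interval_cases h : c.toNat <;> (rw [← hc]; decide)

-- a filtered-guard foldl is a foldl over the filtered, mapped list
lemma foldl_if_filter {α β γ : Type} (p : α → Bool) (f : α → β) (g : γ → β → γ)
    (l : List α) (init : γ) :
    l.foldl (fun d c => if p c then g d (f c) else d) init
      = ((l.filter p).map f).foldl g init := by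
  induction l generalizing init with
  | nil => rfl
  | cons c l ih =>
    by_cases h : p c = true <;> simp [List.foldl, List.filter, h, ih]

lemma counts_eq_counter (my_string : String) :
    my_string.toList.foldl
      (fun d ch => if PySem.Chars.isdigit ch then d.modify (digVal ch) 0 (· + 1) else d)
      PySem.Dict.empty = PySem.Dict.counter (pvDigits my_string) := by
  rw [PySem.Dict.counter_eq_foldl, pvDigits]
  exact foldl_if_filter PySem.Chars.isdigit digVal
    (fun (d : PySem.Dict Int Int) x => d.modify x 0 (· + 1)) my_string.toList PySem.Dict.empty

-- B's second loop, after rewriting: the bucket concatenation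
def pvBuckets (ds : List Int) : List Int :=
  ([0,1,2,3,4,5,6,7,8,9] : List Int).flatMap (fun v => List.replicate (ds.count v) v)

lemma solution_alt_eq_buckets (s : String) :
    solution_alt s = pvBuckets (pvDigits s) := by
  unfold solution_alt
  rw [counts_eq_counter]
  have hr : PySem.List.pyRange 0 10 1 = ([0,1,2,3,4,5,6,7,8,9] : List Int) := by decide
  rw [hr]
  simp only [PySem.List.pyRepeat_singleton, PySem.Dict.getD_counter, Int.toNat_natCast]
  rw [PySem.List.foldl_append_eq_flatMap]
  rfl

lemma pairwise_flatMap_replicate (vs : List Int) (n : Int → Nat)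
    (h : vs.Pairwise (· ≤ ·)) :
    (vs.flatMap (fun v => List.replicate (n v) v)).Pairwise (· ≤ ·) := by
  induction vs with
  | nil => simp
  | cons v vs ih =>
    simp only [List.flatMap_cons, List.pairwise_append]
    obtain ⟨hv, hp⟩ := List.pairwise_cons.mp h
    refine ⟨List.pairwise_replicate.mpr (Or.inr le_rfl), ih hp, ?_⟩
    intro a ha b hb
    rw [List.mem_replicate] at ha
    obtain ⟨w, hw, hbw⟩ := List.mem_flatMap.mp hb
    rw [List.mem_replicate] at hbw
    exact hbw.2 ▸ ha.2 ▸ hv w hw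

lemma buckets_pairwise (ds : List Int) : (pvBuckets ds).Pairwise (· ≤ ·) :=
  pairwise_flatMap_replicate _ _ (by decide)

lemma buckets_perm (ds : List Int)
    (hmem : ∀ d ∈ ds, d ∈ ([0,1,2,3,4,5,6,7,8,9] : List Int)) :
    (pvBuckets ds).Perm ds := by
  rw [List.perm_iff_count]
  intro a
  unfold pvBuckets
  simp only [List.flatMap_cons, List.flatMap_nil, List.append_nil,
    List.count_append, List.count_replicate]
  by_cases ha : a ∈ ([0,1,2,3,4,5,6,7,8,9] : List Int)
  · fin_cases ha <;> simp
  · have h0 : ds.count a = 0 := by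
      rw [List.count_eq_zero]
      intro hin
      exact ha (hmem a hin)
    simp only [List.mem_cons] at ha
    push Not at ha
    rw [h0]
    simp only [beq_iff_eq]
    repeat rw [if_neg (by omega)]

lemma solution_eq_sorted (s : String) :
    solution s = PySem.List.sorted (pvDigits s) (fun x => x) := by
  unfold solution pvDigits
  rw [PySem.List.foldl_append_if]
  rfl

-- ===== VERDICT (by name: the statement is the Claim_ definition above) =====
theorem solution_spec : Claim_equal_solution := by
  intro s _
  unfold Spec_solution
  rw [solution_eq_sorted, solution_alt_eq_buckets]
  refine PySem.List.sorted_id_eq_of_perm_of_pairwise _ _ (buckets_perm _ ?_) (buckets_pairwise _)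
  intro d hd
  unfold pvDigits at hd
  obtain ⟨c, hc, rfl⟩ := List.mem_map.mp hd
  exact digVal_mem_range c (List.mem_filter.mp hc).2
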